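-- pv_equiv track=rewrite | github.com/imedox/crimsonforge | core/paloc_parser.py | _is_symbolic_key
-- ===== SOURCE A (Python) =====
-- def _is_symbolic_key(text: str) -> bool:
--     """Check if a string looks like a symbolic localization key.
--
--     Symbolic keys are ASCII identifiers like ``questdialog_hello_00496``,
--     ``textdialog_quest_00123``, ``epilogue_npc_01``, etc.  They contain
--     only ASCII letters, digits, underscores, and dots, start with a
--     letter or underscore, and are short enough to be a key (not a
--     sentence of translated text).
--     """
--     if not text or len(text) > 200:
--         return False
--     first = text[0]
--     if not (first.isascii() and (first.isalpha() or first == "_")):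
--         return False
--     for ch in text:
--         if not (ch.isascii() and (ch.isalnum() or ch in "_.-")):
--             return False
--     return True
-- ===== SOURCE B (Python) =====
-- import re
--
-- _KEY_RE = re.compile(r"[A-Za-z_][A-Za-z0-9_.\-]{0,199}")
--
--
-- def _is_symbolic_key(text: str) -> bool:
--     return _KEY_RE.fullmatch(text) is not None
-- ===== Notes on version B (the rewrite author's own statement) =====
-- stated objective: idiomatic
-- what changed: A's guard chain and explicit per-character reject loop are replaced by one compiled regular expression whose full-match decides the whole property (leading class = first-character rule, repeated class with {0,199} = body characters plus total length 1..200); no explicit iteration or branching remains.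
import Mathlib
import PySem

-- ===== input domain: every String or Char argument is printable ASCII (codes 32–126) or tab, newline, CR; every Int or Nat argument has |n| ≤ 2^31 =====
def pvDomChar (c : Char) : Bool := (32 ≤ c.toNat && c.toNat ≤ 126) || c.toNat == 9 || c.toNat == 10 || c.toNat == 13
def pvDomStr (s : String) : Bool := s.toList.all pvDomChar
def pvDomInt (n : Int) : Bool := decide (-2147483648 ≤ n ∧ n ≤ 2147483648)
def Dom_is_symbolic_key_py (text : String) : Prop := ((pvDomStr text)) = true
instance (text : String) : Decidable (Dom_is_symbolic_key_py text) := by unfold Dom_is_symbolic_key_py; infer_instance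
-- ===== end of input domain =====

-- B replaces A's guard chain and per-character reject loop by a single regular
-- expression, re.fullmatch(r"[A-Za-z_][A-Za-z0-9_.\-]{0,199}", text) (objective: idiomatic).

-- ===== PORT A =====
-- A's body predicate: ch.isascii() and (ch.isalnum() or ch in "_.-")
-- (isascii ported as code < 128 — exact; 'ch in "_.-"' is a 1-char substring test)
def pvBodyPredA (c : Char) : Bool :=
  decide (c.toNat < 128) && (PySem.Chars.isalnum c || PySem.Chars.isIn [c] "_.-".toList)

-- A's 'for ch in text: if not …: return False' loop
def pvKeyForLoop : List Char → Bool
  | [] => true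
  | c :: rest => if !(pvBodyPredA c) then false else pvKeyForLoop rest

def is_symbolic_key_py (text : String) : Bool :=
  let cs := text.toList
  if cs.length = 0 || 200 < cs.length then false
  else
    match cs with
    | [] => false
    | first :: _ =>
      if !(decide (first.toNat < 128) && (PySem.Chars.isalpha first || first == '_')) then
        false
      else pvKeyForLoop cs

-- ===== PORT B =====
-- the character class [A-Za-z_] of B's regex
def pvReFirst (c : Char) : Bool :=
  ('A' ≤ c && c ≤ 'Z') || ('a' ≤ c && c ≤ 'z') || c == '_'

-- the character class [A-Za-z0-9_.\-] of B's regex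
def pvReBody (c : Char) : Bool :=
  pvReFirst c || ('0' ≤ c && c ≤ '9') || c == '.' || c == '-'

-- bounded repetition [A-Za-z0-9_.\-]{0,k} matched against the WHOLE remaining input
-- (fullmatch semantics: everything must be consumed)
def pvReRep : Nat → List Char → Bool
  | _, [] => true
  | 0, _ :: _ => false
  | k + 1, c :: rest => pvReBody c && pvReRep k rest

-- re.fullmatch(r"[A-Za-z_][A-Za-z0-9_.\-]{0,199}", text) is not None
def is_symbolic_key_py_alt (text : String) : Bool :=
  match text.toList with
  | [] => false
  | c :: rest => pvReFirst c && pvReRep 199 rest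

-- ===== PRECONDITION & SPEC =====
def Spec_is_symbolic_key_py (text : String) (out : Bool) : Prop := out = is_symbolic_key_py_alt text
instance (text : String) (out : Bool) : Decidable (Spec_is_symbolic_key_py text out) := by unfold Spec_is_symbolic_key_py; infer_instance

-- ===== CLAIM (what is proved, stated in full; the proofs are below) =====
def Claim_equal_is_symbolic_key_py : Prop := ∀ (text : String), Dom_is_symbolic_key_py text → Spec_is_symbolic_key_py text (is_symbolic_key_py text)

-- ===== LEMMAS AND PROOFS =====

theorem pvCharLt128OfDom (c : Char) (h : pvDomChar c = true) : c.toNat < 128 := by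
  simp [pvDomChar] at h; omega

theorem pvChar_lift {P : Char → Prop} (h : ∀ n : Nat, n < 128 → P (Char.ofNat n))
    (c : Char) (hc : c.toNat < 128) : P c := by
  have := h c.toNat hc
  rwa [Char.ofNat_toNat] at this

-- per-character facts, checked over all 128 ASCII codes
set_option maxRecDepth 40000 in
theorem pvBodyChar_ofNat : ∀ n : Nat, n < 128 →
    pvBodyPredA (Char.ofNat n) = pvReBody (Char.ofNat n) := by decide

set_option maxRecDepth 40000 in
theorem pvFirstChar_ofNat : ∀ n : Nat, n < 128 →
    (decide ((Char.ofNat n).toNat < 128) &&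
      (PySem.Chars.isalpha (Char.ofNat n) || Char.ofNat n == '_')) =
    pvReFirst (Char.ofNat n) := by decide

set_option maxRecDepth 40000 in
theorem pvFirstBody_ofNat : ∀ n : Nat, n < 128 →
    pvReFirst (Char.ofNat n) = true → pvReBody (Char.ofNat n) = true := by decide

theorem pvAll_congr {l : List Char} {p q : Char → Bool}
    (h : ∀ c ∈ l, p c = q c) : l.all p = l.all q := by
  induction l with
  | nil => rfl
  | cons c rest ih =>
    simp only [List.all_cons, h c List.mem_cons_self,
      ih (fun x hx => h x (List.mem_cons_of_mem c hx))]

theorem pvLoop_eq_all (cs : List Char) :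
    pvKeyForLoop cs = cs.all pvBodyPredA := by
  induction cs with
  | nil => rfl
  | cons c rest ih => by_cases h : pvBodyPredA c = true <;> simp [pvKeyForLoop, h, ih]

-- the bounded repetition equals "short enough and every char in the class"
theorem pvRep_eq (cs : List Char) : ∀ k : Nat,
    pvReRep k cs = (decide (cs.length ≤ k) && cs.all pvReBody) := by
  induction cs with
  | nil => intro k; simp [pvReRep]
  | cons c rest ih =>
    intro k
    cases k with
    | zero => simp [pvReRep]
    | succ k =>
      by_cases h : pvReBody c = true <;>
        simp [pvReRep, ih k, h]

-- ===== VERDICT (by name: the statement is the Claim_ definition above) =====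
theorem is_symbolic_key_py_spec : Claim_equal_is_symbolic_key_py := by
  intro text hdom
  unfold Spec_is_symbolic_key_py is_symbolic_key_py is_symbolic_key_py_alt
  have hchars : ∀ c ∈ text.toList, c.toNat < 128 := by
    intro c hc
    refine pvCharLt128OfDom c ?_
    have := hdom
    unfold Dom_is_symbolic_key_py pvDomStr at this
    rw [List.all_eq_true] at this
    exact this c hc
  rcases hcs : text.toList with _ | ⟨first, rest⟩
  · simp
  · have hmemf : first ∈ text.toList := by rw [hcs]; exact List.mem_cons_self
    have hf : (decide (first.toNat < 128) && (PySem.Chars.isalpha first || first == '_')) =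
        pvReFirst first := by
      exact pvChar_lift (P := fun c => (decide (c.toNat < 128) &&
        (PySem.Chars.isalpha c || c == '_')) = pvReFirst c) pvFirstChar_ofNat
        first (hchars first hmemf)
    have hbodyeq : (first :: rest).all pvBodyPredA = (first :: rest).all pvReBody := by
      apply pvAll_congr
      intro c hc
      exact pvChar_lift (P := fun c => pvBodyPredA c = pvReBody c) pvBodyChar_ofNat
        c (hchars c (by rw [hcs]; exact hc))
    simp only []
    by_cases hlen : rest.length ≤ 199
    · have h1 : ((first :: rest).length = 0 || 200 < (first :: rest).length) = false := by
        simp [List.length_cons]; omega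
      rw [h1]
      simp only [Bool.false_eq_true, if_false, hf]
      rw [pvLoop_eq_all, hbodyeq, pvRep_eq rest 199]
      cases hc : pvReFirst first
      · simp
      · have hb : pvReBody first = true := by
          exact pvChar_lift (P := fun c => pvReFirst c = true → pvReBody c = true)
            pvFirstBody_ofNat first (hchars first hmemf) hc
        simp [hb, hlen]
    · have h1 : ((first :: rest).length = 0 || decide (200 < (first :: rest).length)) = true := by
        simp [List.length_cons]; omega
      rw [h1]
      rw [pvRep_eq rest 199]
      simp [hlen]
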